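-- pv_equiv track=rewrite | github.com/JosefStrillinger/Security_Laboratorium | Transpositional_Cipher/test.py | disrupted_columnar_cipher
-- ===== SOURCE A (Python) =====
-- def disrupted_columnar_cipher(message, key):
--     # Create the grid by filling it with empty spaces
--     grid = [[' ' for j in range(len(key))] for i in range(len(message)//len(key) + 1)]
--     # Fill the grid with the message
--     for i, char in enumerate(message):
--         row = i // len(key)
--         col = i % len(key)
--         grid[row][col] = char
--     # Rearrange the columns according to the key
--     new_grid = [[' ' for j in range(len(key))] for i in range(len(message)//len(key) + 1)]
--     for i, col in enumerate(key):
--         for j, char in enumerate(grid):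
--             new_grid[j][i] = char[col-1]
--     # Flatten the grid to create the ciphertext
--     ciphertext = ''.join([''.join(row) for row in new_grid]).replace(' ','')
--     return ciphertext
-- ===== SOURCE B (Python) =====
-- def disrupted_columnar_cipher(message, key):
--     C = len(key)
--     R = len(message) // C + 1
--     out = []
--     for r in range(R):
--         row_str = message[r*C:(r+1)*C].ljust(C, ' ')
--         out.append(''.join(row_str[col-1] for col in key))
--     return ''.join(out).replace(' ', '')
-- ===== Notes on version B (the rewrite author's own statement) =====
-- stated objective: simpler
-- what changed: Replaces the two preallocated R-by-C grids and the index-arithmetic fill/permute loops by direct row slicing with ljust padding and a per-row permutation join, building the ciphertext row by row.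
import Mathlib
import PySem

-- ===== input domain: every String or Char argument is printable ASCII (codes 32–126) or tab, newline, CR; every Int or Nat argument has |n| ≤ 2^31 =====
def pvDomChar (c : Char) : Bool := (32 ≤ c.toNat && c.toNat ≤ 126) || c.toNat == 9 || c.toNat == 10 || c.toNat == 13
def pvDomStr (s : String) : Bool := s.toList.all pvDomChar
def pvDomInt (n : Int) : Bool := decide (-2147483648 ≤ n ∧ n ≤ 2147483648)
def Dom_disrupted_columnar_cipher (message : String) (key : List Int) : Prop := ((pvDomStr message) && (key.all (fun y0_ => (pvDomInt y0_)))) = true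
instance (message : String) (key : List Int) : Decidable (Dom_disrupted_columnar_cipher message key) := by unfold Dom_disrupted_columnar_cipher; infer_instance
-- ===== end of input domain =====

-- B replaces A's two preallocated grids and their index-arithmetic fill/permute loops by direct
-- row slicing with ljust padding and a per-row permutation join (objective: simpler).

-- ===== PORT A =====
-- one fill-loop step: grid[row][col] = char with row = i // len(key), col = i % len(key)
def pvFillStep (C : Nat) (g : List (List Char)) (ic : Int × Char) : List (List Char) :=
  let row := PySem.Int.floordiv ic.1 (C : Int)
  let col := PySem.Int.mod ic.1 (C : Int)
  PySem.List.pySetD g row (PySem.List.pySetD (PySem.List.pyGetD g row []) col ic.2)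

-- one inner-loop step of the rearrangement: new_grid[j][i] = char[col-1]
def pvRowSet (i colv : Int) (ng : List (List Char)) (jrow : Int × List Char) : List (List Char) :=
  PySem.List.pySetD ng jrow.1
    (PySem.List.pySetD (PySem.List.pyGetD ng jrow.1 []) i
      (PySem.List.pyGetD jrow.2 (colv - 1) ' '))

def disrupted_columnar_cipher (message : String) (key : List Int) : String :=
  let C := key.length
  -- len(message) // len(key) on the Nat side: equal to Python's floordiv for these nonnegative
  -- ints (PySem.Int.floordiv_natCast); len(key) = 0 raises ZeroDivisionError, excluded by Pre_
  let R := message.toList.length / C + 1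
  let grid0 : List (List Char) := (List.range R).map (fun _ => (List.range C).map (fun _ => ' '))
  let grid := (PySem.List.enumerate message.toList 0).foldl (pvFillStep C) grid0
  let newGrid0 : List (List Char) := (List.range R).map (fun _ => (List.range C).map (fun _ => ' '))
  let newGrid := (PySem.List.enumerate key 0).foldl
    (fun ng icol => (PySem.List.enumerate grid 0).foldl (pvRowSet icol.1 icol.2) ng) newGrid0
  PySem.Str.replace (String.ofList newGrid.flatten) " " ""

-- ===== PORT B =====
def disrupted_columnar_cipher_alt (message : String) (key : List Int) : String :=
  let C := key.length
  let R := message.toList.length / C + 1   -- as in A: Python ints, nonnegative; C = 0 excluded by Pre_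
  let out := (List.range R).foldl (fun acc r =>
    -- row_str = message[r*C:(r+1)*C].ljust(C, ' ')
    let s := PySem.List.slice message.toList (some ((r*C : Nat) : Int)) (some (((r+1)*C : Nat) : Int))
    let rowStr := s ++ List.replicate (C - s.length) ' '
    -- ''.join(row_str[col-1] for col in key)
    acc ++ [key.map (fun col => PySem.List.pyGetD rowStr (col - 1) ' ')]) []
  PySem.Str.replace (String.ofList out.flatten) " " ""

-- ===== PRECONDITION & SPEC =====
-- Pre_ excludes exactly the inputs where A raises: key = [] (ZeroDivisionError) and key entries
-- whose in-row index col-1 is outside Python's [-C, C-1] range (IndexError).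
def Pre_disrupted_columnar_cipher (message : String) (key : List Int) : Prop :=
  key ≠ [] ∧ ∀ col ∈ key, 1 - (key.length : Int) ≤ col ∧ col ≤ (key.length : Int)
instance (message : String) (key : List Int) : Decidable (Pre_disrupted_columnar_cipher message key) := by
  unfold Pre_disrupted_columnar_cipher; infer_instance
def pvWitness_disrupted_columnar_cipher : String × List Int := ("hello ab", [2, 1, 3])

def Spec_disrupted_columnar_cipher (message : String) (key : List Int) (out : String) : Prop := out = disrupted_columnar_cipher_alt message key
instance (message : String) (key : List Int) (out : String) : Decidable (Spec_disrupted_columnar_cipher message key out) := by unfold Spec_disrupted_columnar_cipher; infer_instance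

-- ===== CLAIM (what is proved, stated in full; the proofs are below) =====
def Claim_equal_disrupted_columnar_cipher : Prop := ∀ (message : String) (key : List Int), Dom_disrupted_columnar_cipher message key → Pre_disrupted_columnar_cipher message key → Spec_disrupted_columnar_cipher message key (disrupted_columnar_cipher message key)

-- ===== LEMMAS AND PROOFS =====
theorem pv_take_set_succ {α : Type} (l : List α) (s : Nat) (x : α) (h : s < l.length) :
    (l.set s x).take (s + 1) = l.take s ++ [x] := by
  rw [List.set_eq_take_append_cons_drop, if_pos h]
  rw [List.take_append]
  simp [List.length_take, Nat.min_eq_left (Nat.le_of_lt h)]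

theorem pv_drop_set {α : Type} (l : List α) (s k : Nat) (x : α) (h : s < k) :
    (l.set s x).drop k = l.drop k := by
  apply List.ext_getElem
  · simp
  · intro i h1 h2
    simp only [List.getElem_drop, List.getElem_set]
    rw [if_neg (by omega)]

theorem pv_inner_fold (i colv : Int) :
    ∀ (grid : List (List Char)) (s : Nat) (ng : List (List Char)),
    s + grid.length ≤ ng.length →
    (PySem.List.enumerate grid (s : Int)).foldl (pvRowSet i colv) ng
      = ng.take s
        ++ List.zipWith (fun row r => PySem.List.pySetD r i (PySem.List.pyGetD row (colv - 1) ' ')) grid (ng.drop s)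
        ++ ng.drop (s + grid.length) := by
  intro grid
  induction grid with
  | nil => intro s ng h; simp [PySem.List.enumerate]
  | cons row rest ih =>
    intro s ng h
    have hs : s < ng.length := by simp at h; omega
    rw [PySem.List.enumerate_cons]
    have hcast : (s : Int) + 1 = ((s + 1 : Nat) : Int) := by push_cast; ring
    rw [List.foldl_cons, hcast]
    have hstep : pvRowSet i colv ng ((s : Int), row)
        = ng.set s (PySem.List.pySetD (ng.getD s []) i (PySem.List.pyGetD row (colv - 1) ' ')) := by
      simp [pvRowSet]
    rw [hstep]
    set x := PySem.List.pySetD (ng.getD s []) i (PySem.List.pyGetD row (colv - 1) ' ') with hx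
    have hlen' : (s + 1) + rest.length ≤ (ng.set s x).length := by simp at h ⊢; omega
    rw [ih (s + 1) (ng.set s x) hlen']
    have h1 : (ng.set s x).take (s + 1) = ng.take s ++ [x] := pv_take_set_succ ng s x hs
    have h2 : (ng.set s x).drop (s + 1) = ng.drop (s + 1) := pv_drop_set ng s (s+1) x (by omega)
    have h3 : ng.drop s = ng[s] :: ng.drop (s + 1) := (List.drop_eq_getElem_cons hs)
    have h4 : ng.getD s [] = ng[s] := by simp [List.getD_eq_getElem?_getD, List.getElem?_eq_getElem hs]
    rw [h1, h2, h3]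
    simp only [List.zipWith_cons_cons, List.length_cons]
    have h5 : (ng.set s x).drop (s + 1 + rest.length) = ng.drop (s + (rest.length + 1)) := by
      rw [pv_drop_set ng s (s+1+rest.length) x (by omega)]
      congr 1; omega
    rw [h5, hx, h4]
    simp

theorem pv_zipWith_zipWith_same {α β γ δ : Type} (f : α → γ → δ) (g : α → β → γ)
    (l₁ : List α) (l₂ : List β) :
    List.zipWith f l₁ (List.zipWith g l₁ l₂) = List.zipWith (fun a b => f a (g a b)) l₁ l₂ := by
  induction l₁ generalizing l₂ with
  | nil => simp
  | cons a t ih => cases l₂ <;> simp_all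

theorem pv_zipWith_const_right {α β : Type} (l₁ : List α) (l₂ : List β) (h : l₁.length = l₂.length) :
    List.zipWith (fun _ b => b) l₁ l₂ = l₂ := by
  induction l₁ generalizing l₂ with
  | nil => cases l₂ <;> simp_all
  | cons a t ih => cases l₂ with
    | nil => simp_all
    | cons b t₂ => simp_all

theorem pv_perm_fold :
    ∀ (key' : List Int) (s : Nat) (grid ng : List (List Char)), grid.length = ng.length →
    (PySem.List.enumerate key' (s : Int)).foldl
        (fun ng icol => (PySem.List.enumerate grid 0).foldl (pvRowSet icol.1 icol.2) ng) ng
      = List.zipWith (fun row r =>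
          (PySem.List.enumerate key' (s : Int)).foldl
            (fun r ic => PySem.List.pySetD r ic.1 (PySem.List.pyGetD row (ic.2 - 1) ' ')) r) grid ng := by
  intro key'
  induction key' with
  | nil =>
    intro s grid ng h
    simp only [PySem.List.enumerate, List.foldl_nil]
    · exact (pv_zipWith_const_right grid ng h).symm
  | cons k ks ih =>
    intro s grid ng h
    rw [PySem.List.enumerate_cons, List.foldl_cons]
    have h0 : (PySem.List.enumerate grid ((0:Nat) : Int)).foldl (pvRowSet (s:Int) k) ng
        = List.zipWith (fun row r => PySem.List.pySetD r (s:Int) (PySem.List.pyGetD row (k - 1) ' ')) grid ng := by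
      rw [pv_inner_fold (s:Int) k grid 0 ng (by omega)]
      simp [List.drop_of_length_le, h]
    have h0' : (PySem.List.enumerate grid 0).foldl (pvRowSet (s:Int) k) ng
        = List.zipWith (fun row r => PySem.List.pySetD r (s:Int) (PySem.List.pyGetD row (k - 1) ' ')) grid ng := by
      exact_mod_cast h0
    rw [h0']
    have hcast : (s : Int) + 1 = ((s + 1 : Nat) : Int) := by push_cast; ring
    rw [hcast, ih (s+1) grid _ (by simp [List.length_zipWith]; omega)]
    rw [pv_zipWith_zipWith_same]
    congr 1

theorem pv_rowfold (g : Int → Char) :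
    ∀ (key' : List Int) (s : Nat) (r : List Char), r.length = s + key'.length →
    (PySem.List.enumerate key' (s : Int)).foldl (fun r ic => PySem.List.pySetD r ic.1 (g ic.2)) r
      = r.take s ++ key'.map g := by
  intro key'
  induction key' with
  | nil =>
    intro s r h
    simp only [List.length_nil] at h
    have ht : r.take s = r := List.take_of_length_le (by omega)
    simp [PySem.List.enumerate, ht]
  | cons k ks ih =>
    intro s r h
    rw [PySem.List.enumerate_cons, List.foldl_cons]
    have hcast : (s : Int) + 1 = ((s + 1 : Nat) : Int) := by push_cast; ring
    have hs : s < r.length := by simp at h; omega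
    have hstep : PySem.List.pySetD r (s:Int) (g k) = r.set s (g k) := by simp
    rw [hcast, hstep, ih (s+1) _ (by simp at h ⊢; omega)]
    rw [pv_take_set_succ r s (g k) hs]
    simp

def pvCell (g : List (List Char)) (r c : Nat) : Char := (g.getD r []).getD c ' '

theorem pv_getD_set {α : Type} (l : List α) (n r : Nat) (x d : α) (hn : n < l.length) :
    (l.set n x).getD r d = if r = n then x else l.getD r d := by
  by_cases hr : r = n
  · subst hr
    rw [if_pos rfl]
    simp [List.getD_eq_getElem?_getD, List.getElem?_set_self hn]
  · rw [if_neg hr]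
    simp [List.getD_eq_getElem?_getD, List.getElem?_set_ne (fun h => hr h.symm)]

theorem pv_fill_main (C : Nat) (hC : 0 < C) :
    ∀ (chars : List Char) (s : Nat) (g : List (List Char)),
    (∀ r, r < g.length → (g.getD r []).length = C) →
    s + chars.length ≤ g.length * C →
    ((PySem.List.enumerate chars (s : Int)).foldl (pvFillStep C) g).length = g.length ∧
    (∀ r, r < g.length →
      (((PySem.List.enumerate chars (s : Int)).foldl (pvFillStep C) g).getD r []).length = C) ∧
    (∀ r c, r < g.length → c < C →
      pvCell ((PySem.List.enumerate chars (s : Int)).foldl (pvFillStep C) g) r c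
        = if s ≤ r * C + c ∧ r * C + c < s + chars.length then chars.getD (r * C + c - s) ' '
          else pvCell g r c) := by
  intro chars
  induction chars with
  | nil =>
    intro s g hrow hle
    refine ⟨by simp [PySem.List.enumerate],
      fun r hr => by simp only [PySem.List.enumerate, List.foldl_nil]; exact hrow r hr, ?_⟩
    intro r c hr hc
    simp only [PySem.List.enumerate, List.foldl_nil, List.length_nil]
    rw [if_neg (by omega)]
  | cons ch rest ih =>
    intro s g hrow hle
    have hlen : (ch :: rest).length = rest.length + 1 := by simp
    have hsC : s < g.length * C := by simp at hle; omega
    have hri : s / C < g.length := (Nat.div_lt_iff_lt_mul hC).mpr (by omega)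
    have hci : s % C < C := Nat.mod_lt _ hC
    have hcast : (s : Int) + 1 = ((s + 1 : Nat) : Int) := by push_cast; ring
    rw [PySem.List.enumerate_cons, List.foldl_cons, hcast]
    have hstep : pvFillStep C g ((s : Int), ch)
        = g.set (s / C) ((g.getD (s / C) []).set (s % C) ch) := by
      simp only [pvFillStep, PySem.Int.floordiv_natCast, PySem.Int.mod_natCast,
        PySem.List.pySetD_natCast, PySem.List.pyGetD_natCast]
    rw [hstep]
    set g1 := g.set (s / C) ((g.getD (s / C) []).set (s % C) ch) with hg1
    have hlen1 : g1.length = g.length := by simp [hg1]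
    have hgd1 : ∀ r, g1.getD r [] = if r = s / C then (g.getD (s / C) []).set (s % C) ch else g.getD r [] := by
      intro r; exact pv_getD_set g (s / C) r _ [] hri
    have hrow1 : ∀ r, r < g1.length → (g1.getD r []).length = C := by
      intro r hr; rw [hgd1]; split_ifs with h
      · rw [List.length_set]; exact hrow (s / C) hri
      · exact hrow r (by omega)
    have hle1 : (s + 1) + rest.length ≤ g1.length * C := by
      rw [hlen1]; simp at hle; omega
    obtain ⟨ihl, ihr, ihc⟩ := ih (s + 1) g1 hrow1 hle1
    refine ⟨by rw [ihl, hlen1], fun r hr => ihr r (by omega), ?_⟩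
    intro r c hr hc
    rw [ihc r c (by omega) hc]
    have hrc : r * C + c = s ↔ (r = s / C ∧ c = s % C) := by
      constructor
      · intro h
        have h1 : (r * C + c) / C = r := by
          rw [mul_comm, Nat.mul_add_div hC, Nat.div_eq_of_lt hc]
          omega
        have h2 : (r * C + c) % C = c := by
          rw [mul_comm, Nat.mul_add_mod, Nat.mod_eq_of_lt hc]
        
        constructor
        · rw [← h, h1]
        · rw [← h, h2]
      · rintro ⟨h1, h2⟩
        subst h1; subst h2
        rw [mul_comm]
        exact Nat.div_add_mod s C
    by_cases heq : r * C + c = s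
    · obtain ⟨h1, h2⟩ := hrc.mp heq
      rw [if_neg (by omega), if_pos (by simp [hlen]; omega)]
      have : pvCell g1 r c = ch := by
        unfold pvCell
        rw [hgd1, if_pos h1, h2]
        rw [pv_getD_set _ _ _ _ _ (by rw [hrow (s / C) hri]; exact hci), if_pos rfl]
      rw [this, heq]
      simp
    · by_cases hin : s + 1 ≤ r * C + c ∧ r * C + c < s + 1 + rest.length
      · rw [if_pos hin, if_pos (by omega)]
        have h3 : r * C + c - s = (r * C + c - (s + 1)) + 1 := by omega
        rw [h3]
        simp [List.getD_cons_succ]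
      · rw [if_neg hin, if_neg (by simp [hlen]; omega)]
        unfold pvCell
        rw [hgd1]
        split_ifs with h4
        · have h5 : c ≠ s % C := by
            intro h6
            exact heq (hrc.mpr ⟨h4, h6⟩)
          rw [pv_getD_set _ _ _ _ _ (by rw [hrow (s / C) hri]; exact hci), if_neg h5]
          rw [h4]
        · rfl
-- B's padded row r
def pvBrow (ms : List Char) (C r : Nat) : List Char :=
  let t := (ms.drop (r * C)).take C
  t ++ List.replicate (C - t.length) ' '

theorem pv_grid0_eq (R C : Nat) :
    (List.range R).map (fun _ => (List.range C).map (fun _ => ' ')) = List.replicate R (List.replicate C ' ') := by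
  rw [List.map_const', List.map_const', List.length_range, List.length_range]

theorem pv_getD_replicate {α : Type} (n r : Nat) (x : α) (d : α) (hr : r < n) :
    (List.replicate n x).getD r d = x := by
  simp [List.getD_eq_getElem?_getD, List.getElem?_replicate, hr]

theorem pv_grid_eq_map_brow (ms : List Char) (C : Nat) (hC : 0 < C) :
    (PySem.List.enumerate ms ((0 : Nat) : Int)).foldl (pvFillStep C)
        (List.replicate (ms.length / C + 1) (List.replicate C ' '))
      = (List.range (ms.length / C + 1)).map (pvBrow ms C) := by
  set n := ms.length with hn
  set R := n / C + 1 with hR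
  have hbound : 0 + ms.length ≤ (List.replicate R (List.replicate C ' ')).length * C := by
    rw [List.length_replicate]
    have h1 := Nat.div_add_mod n C
    have h2 : n % C < C := Nat.mod_lt _ hC
    have h3 : R * C = C * (n / C) + C := by rw [hR]; ring
    omega
  have hrow0 : ∀ r, r < (List.replicate R (List.replicate C ' ')).length →
      ((List.replicate R (List.replicate C ' ')).getD r []).length = C := by
    intro r hr
    rw [List.length_replicate] at hr
    rw [pv_getD_replicate _ _ _ _ hr, List.length_replicate]
  obtain ⟨hl, hrw, hcell⟩ := pv_fill_main C hC ms 0 _ hrow0 hbound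
  rw [List.length_replicate] at hl hrw hcell
  apply List.ext_getElem
  · rw [hl, List.length_map, List.length_range]
  · intro r h1 h2
    rw [List.getElem_map, List.getElem_range]
    have hrR : r < R := by rw [hl] at h1; exact h1
    have hrowlen : (((PySem.List.enumerate ms ((0:Nat):Int)).foldl (pvFillStep C)
        (List.replicate R (List.replicate C ' '))).getD r []).length = C := hrw r hrR
    have hget : ((PySem.List.enumerate ms ((0:Nat):Int)).foldl (pvFillStep C)
        (List.replicate R (List.replicate C ' ')))[r]
        = ((PySem.List.enumerate ms ((0:Nat):Int)).foldl (pvFillStep C)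
        (List.replicate R (List.replicate C ' '))).getD r [] := by
      rw [List.getD_eq_getElem?_getD, List.getElem?_eq_getElem h1]
      rfl
    rw [hget]
    have htlen : ((ms.drop (r * C)).take C).length = min C (n - r * C) := by
      rw [List.length_take, List.length_drop]
    apply List.ext_getElem
    · rw [hrowlen]
      simp only [pvBrow, List.length_append, List.length_replicate, htlen]
      omega
    · intro c hc1 hc2
      rw [hrowlen] at hc1
      have hcell' := hcell r c hrR hc1
      have hpv : pvCell ((PySem.List.enumerate ms ((0:Nat):Int)).foldl (pvFillStep C)
          (List.replicate R (List.replicate C ' '))) r c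
          = (((PySem.List.enumerate ms ((0:Nat):Int)).foldl (pvFillStep C)
          (List.replicate R (List.replicate C ' '))).getD r []).getD c ' ' := rfl
      have hgc : (((PySem.List.enumerate ms ((0:Nat):Int)).foldl (pvFillStep C)
          (List.replicate R (List.replicate C ' '))).getD r []).getD c ' '
          = (((PySem.List.enumerate ms ((0:Nat):Int)).foldl (pvFillStep C)
          (List.replicate R (List.replicate C ' '))).getD r [])[c] := by
        rw [List.getD_eq_getElem?_getD, List.getElem?_eq_getElem (by rw [hrowlen]; exact hc1)]
        rfl
      rw [← hgc, ← hpv, hcell']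
      have hcell0 : pvCell (List.replicate R (List.replicate C ' ')) r c = ' ' := by
        unfold pvCell
        rw [pv_getD_replicate _ _ _ _ hrR, pv_getD_replicate _ _ _ _ hc1]
      -- B side element
      have hb : (pvBrow ms C r)[c]'hc2 = if r * C + c < n then ms.getD (r * C + c) ' ' else ' ' := by
        simp only [pvBrow]
        by_cases hin : c < ((ms.drop (r * C)).take C).length
        · rw [List.getElem_append_left hin]
          rw [List.getElem_take, List.getElem_drop]
          rw [htlen] at hin
          rw [if_pos (by omega)]
          rw [List.getD_eq_getElem?_getD, List.getElem?_eq_getElem (by omega)]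
          rfl
        · rw [List.getElem_append_right (by omega)]
          rw [List.getElem_replicate]
          rw [htlen] at hin
          rw [if_neg (by omega)]
      rw [hb]
      rw [hcell0]
      simp only [Nat.zero_add, Nat.zero_le, true_and]
      split_ifs <;> rfl

theorem pv_zipWith_replicate_right {α β γ : Type} (f : α → β → γ) (l : List α) (n : Nat) (x : β)
    (h : l.length = n) :
    List.zipWith f l (List.replicate n x) = l.map (fun a => f a x) := by
  induction l generalizing n with
  | nil => simp
  | cons a t ih => cases n with
    | zero => simp_all
    | succ m =>
      simp only [List.replicate_succ, List.zipWith_cons_cons, List.map_cons]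
      rw [ih m (by simp_all)]
theorem pv_main (message : String) (key : List Int) (hk : key ≠ []) :
    disrupted_columnar_cipher message key = disrupted_columnar_cipher_alt message key := by
  have hC : 0 < key.length := List.length_pos_iff.mpr hk
  simp only [disrupted_columnar_cipher, disrupted_columnar_cipher_alt]
  set ms := message.toList with hms
  set C := key.length with hCdef
  set R := ms.length / C + 1 with hR
  congr 2
  -- A's newGrid = B's out
  rw [pv_grid0_eq R C]
  have h0 : ((0 : Nat) : Int) = (0 : Int) := rfl
  have hgrid : (PySem.List.enumerate ms (0 : Int)).foldl (pvFillStep C)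
      (List.replicate R (List.replicate C ' '))
      = (List.range R).map (pvBrow ms C) := by
    rw [← h0]; exact pv_grid_eq_map_brow ms C hC
  rw [hgrid]
  -- rearrangement loops
  have hlen : ((List.range R).map (pvBrow ms C)).length
      = (List.replicate R (List.replicate C ' ') : List (List Char)).length := by
    simp
  have hperm := pv_perm_fold key 0 ((List.range R).map (pvBrow ms C))
      (List.replicate R (List.replicate C ' ')) hlen
  rw [h0] at hperm
  rw [hperm]
  rw [pv_zipWith_replicate_right _ _ R _ (by simp)]
  -- each row becomes key.map
  have hrowmap : ∀ row : List Char,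
      (PySem.List.enumerate key ((0:Nat) : Int)).foldl
        (fun r ic => PySem.List.pySetD r ic.1 (PySem.List.pyGetD row (ic.2 - 1) ' ')) (List.replicate C ' ')
      = key.map (fun col => PySem.List.pyGetD row (col - 1) ' ') := by
    intro row
    rw [pv_rowfold (fun colv => PySem.List.pyGetD row (colv - 1) ' ') key 0 _ (by simp [hCdef])]
    simp
  -- B's fold is a map
  rw [PySem.List.foldl_append_singleton_eq_map
    (fun r => key.map (fun col => PySem.List.pyGetD
      (PySem.List.slice ms (some ((r*C : Nat) : Int)) (some (((r+1)*C : Nat) : Int)) ++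
        List.replicate (C - (PySem.List.slice ms (some ((r*C : Nat) : Int)) (some (((r+1)*C : Nat) : Int))).length) ' ')
      (col - 1) ' ')) (List.range R) []]
  rw [List.map_map, List.nil_append]
  congr 1
  apply List.map_congr_left
  intro r _
  simp only [Function.comp]
  rw [h0] at hrowmap
  rw [hrowmap (pvBrow ms C r)]
  have hslice : PySem.List.slice ms (some ((r*C : Nat) : Int)) (some (((r+1)*C : Nat) : Int))
      = (ms.drop (r*C)).take C := by
    rw [PySem.List.slice_natCast]
    congr 1
    have : (r+1)*C = r*C + C := by ring
    omega
  rw [hslice]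
  rfl

-- ===== VERDICT (by name: the statement is the Claim_ definition above) =====
theorem disrupted_columnar_cipher_spec : Claim_equal_disrupted_columnar_cipher := by
  intro message key _ hpre
  unfold Spec_disrupted_columnar_cipher
  exact pv_main message key hpre.1
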